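-- pv_equiv track=rewrite | github.com/llilliililli/codingPractice | thisCodingPython/ch03.py | bigNumber
-- ===== SOURCE A (Python) =====
-- def bigNumber(n,m,k,data):
--
--     data.sort() #큰 수 정렬 내림차순
--     first = data[n - 1] # 첫번째로 큰 수
--     second = data[n - 2] # 두번째로 큰 수
--
--     result = 0
--
--     while True:
--         for i in range(k):
--             if m == 0:
--                 break
--             result += first
--             m -= 1
--         if m == 0:
--             break
--         result += second
--         m -= 1
--
--     return result
-- ===== SOURCE B (Python) =====
-- def bigNumber(n, m, k, data):
--     s = sorted(data)
--     first = s[n - 1]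
--     second = s[n - 2]
--     if k <= 0:
--         # every cycle contributes only the second-largest number
--         return m * second
--     q, r = divmod(m, k + 1)
--     return q * (k * first + second) + r * first
-- ===== Notes on version B (the rewrite author's own statement) =====
-- stated objective: simpler
-- what changed: Replaces the per-addition while/for loop with a closed form: one divmod splits m into q full groups of k firsts plus one second and a remainder of r firsts (all seconds when k<=0); the loop-measured cost drops from Theta(m) additions to O(1) after the sort, though sorting dominates the timed inputs.
import Mathlib
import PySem

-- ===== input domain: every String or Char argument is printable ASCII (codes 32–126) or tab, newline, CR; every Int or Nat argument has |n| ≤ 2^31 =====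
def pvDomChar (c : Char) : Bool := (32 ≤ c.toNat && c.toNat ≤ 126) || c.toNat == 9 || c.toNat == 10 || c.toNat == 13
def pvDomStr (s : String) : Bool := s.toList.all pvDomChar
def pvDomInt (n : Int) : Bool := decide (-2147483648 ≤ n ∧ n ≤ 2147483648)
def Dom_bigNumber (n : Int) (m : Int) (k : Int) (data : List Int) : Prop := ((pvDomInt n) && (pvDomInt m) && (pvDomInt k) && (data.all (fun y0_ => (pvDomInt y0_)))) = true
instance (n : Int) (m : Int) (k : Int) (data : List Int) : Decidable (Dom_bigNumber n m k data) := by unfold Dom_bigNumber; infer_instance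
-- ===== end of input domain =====

-- B replaces A's per-addition while/for loop with a single divmod closed form (simpler);
-- A sorts `data` in place (B does not mutate) — the equivalence proved is about the return value.

-- ===== PORT A =====
-- inner `for i in range(k)`: i counts the remaining range iterations (Python's range is
-- lazy, so the loop body runs only until `if m == 0: break` fires); state (m, result)
def pvInnerFor (first : Int) : Nat → Int → Int → Int × Int
  | 0, m, result => (m, result)
  | i + 1, m, result =>
    if m = 0 then (m, result)
    else pvInnerFor first i (m - 1) (result + first)

-- outer `while True`; the fuel only makes the recursion total (Pre_ gives 0 ≤ m and every
-- pass that does not break strictly decreases m, so fuel = m.toNat + 1 always suffices)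
def pvOuter (first second k : Int) : Nat → Int → Int → Int
  | 0, _, result => result
  | fuel + 1, m, result =>
    let s := pvInnerFor first k.toNat m result
    if s.1 = 0 then s.2
    else pvOuter first second k fuel (s.1 - 1) (s.2 + second)

def bigNumber (n : Int) (m : Int) (k : Int) (data : List Int) : Int :=
  let d := PySem.List.sorted data (fun x => x) false
  let first := PySem.List.pyGetD d (n - 1) 0
  let second := PySem.List.pyGetD d (n - 2) 0
  pvOuter first second k (m.toNat + 1) m 0

-- ===== PORT B =====
def bigNumber_alt (n : Int) (m : Int) (k : Int) (data : List Int) : Int :=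
  let s := PySem.List.sorted data (fun x => x) false
  let first := PySem.List.pyGetD s (n - 1) 0
  let second := PySem.List.pyGetD s (n - 2) 0
  if k ≤ 0 then m * second
  else
    let q := PySem.Int.floordiv m (k + 1)
    let r := PySem.Int.mod m (k + 1)
    q * (k * first + second) + r * first

-- ===== PRECONDITION & SPEC =====
-- A diverges for m < 0 and raises IndexError when index n-1 or n-2 is out of range
def Pre_bigNumber (n : Int) (m : Int) (k : Int) (data : List Int) : Prop :=
  0 ≤ m ∧ PySem.Raise.InRange data.length (n - 1) ∧ PySem.Raise.InRange data.length (n - 2)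
instance (n : Int) (m : Int) (k : Int) (data : List Int) : Decidable (Pre_bigNumber n m k data) := by
  unfold Pre_bigNumber; infer_instance

def pvWitness_bigNumber : Int × Int × Int × List Int := (5, 8, 3, [2, 4, 5, 4, 6])

def Spec_bigNumber (n : Int) (m : Int) (k : Int) (data : List Int) (out : Int) : Prop := out = bigNumber_alt n m k data
instance (n : Int) (m : Int) (k : Int) (data : List Int) (out : Int) : Decidable (Spec_bigNumber n m k data out) := by unfold Spec_bigNumber; infer_instance

-- ===== CLAIM (what is proved, stated in full; the proofs are below) =====
def Claim_equal_bigNumber : Prop := ∀ (n : Int) (m : Int) (k : Int) (data : List Int), Dom_bigNumber n m k data → Pre_bigNumber n m k data → Spec_bigNumber n m k data (bigNumber n m k data)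

-- ===== LEMMAS AND PROOFS =====

theorem pvInnerFor_char (first : Int) (K : Nat) (m result : Int) (hm : 0 ≤ m) :
    pvInnerFor first K m result = (m - min m K, result + min m K * first) := by
  induction K generalizing m result with
  | zero => simp [pvInnerFor]; omega
  | succ i ih =>
    by_cases h0 : m = 0
    · subst h0
      rw [pvInnerFor, if_pos rfl]
      have hz : min (0 : Int) (((i + 1 : Nat)) : Int) = 0 := by push_cast; omega
      rw [hz]; simp
    · rw [pvInnerFor, if_neg h0, ih (m - 1) (result + first) (by omega)]
      have hmin : min (m - 1) (i : Int) = min m ((i + 1 : Nat) : Int) - 1 := by push_cast; omega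
      refine Prod.ext ?_ ?_
      · simp only []; omega
      · simp only []; rw [hmin]; ring

theorem pvOuter_k0 (first second k : Int) (hk : k ≤ 0) :
    ∀ (fuel : Nat) (m result : Int), 0 ≤ m → m.toNat < fuel →
      pvOuter first second k fuel m result = result + m * second := by
  intro fuel
  induction fuel with
  | zero => intro m result _ h; omega
  | succ f ih =>
    intro m result hm hf
    have hk0 : k.toNat = 0 := by omega
    rw [pvOuter, hk0]
    simp only [pvInnerFor]
    by_cases h0 : m = 0
    · simp [h0]
    · simp only [if_neg h0]
      rw [ih (m - 1) (result + second) (by omega) (by omega)]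
      ring

theorem pvOuter_kpos (first second k : Int) (hk : 1 ≤ k) :
    ∀ (fuel : Nat) (m result : Int), 0 ≤ m → m.toNat < fuel →
      pvOuter first second k fuel m result
        = result + (m / (k + 1)) * (k * first + second) + (m % (k + 1)) * first := by
  intro fuel
  induction fuel with
  | zero => intro m result _ h; omega
  | succ f ih =>
    intro m result hm hf
    have hkc : ((k.toNat : Nat) : Int) = k := by omega
    rw [pvOuter]
    simp only [pvInnerFor_char first _ m result hm, hkc]
    by_cases hmk : m ≤ k
    · have hmin : min m k = m := by omega
      simp only [hmin, sub_self, if_true]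
      rw [Int.ediv_eq_zero_of_lt hm (by omega), Int.emod_eq_of_lt hm (by omega)]
      ring
    · have hmin : min m k = k := by omega
      simp only [hmin, if_neg (by omega : ¬ (m - k = 0))]
      rw [ih (m - k - 1) (result + k * first + second) (by omega) (by omega)]
      have hd : (m - k - 1) / (k + 1) = m / (k + 1) - 1 := by
        have := Int.add_mul_ediv_right m (-1) (show (k+1) ≠ 0 by omega)
        have e : m + (-1) * (k + 1) = m - k - 1 := by ring
        rw [e] at this; omega
      have hmo : (m - k - 1) % (k + 1) = m % (k + 1) := by
        have := Int.sub_emod_right m (k + 1)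
        have e : m - (k + 1) = m - k - 1 := by ring
        rw [e] at this; omega
      rw [hd, hmo]
      ring

-- ===== VERDICT (by name: the statement is the Claim_ definition above) =====
theorem bigNumber_spec : Claim_equal_bigNumber := by
  intro n m k data _ hp
  obtain ⟨hm, -, -⟩ := hp
  unfold Spec_bigNumber bigNumber bigNumber_alt
  by_cases hk : k ≤ 0
  · rw [if_pos hk, pvOuter_k0 _ _ k hk _ m 0 hm (by omega)]
    ring
  · rw [if_neg hk, pvOuter_kpos _ _ k (by omega) _ m 0 hm (by omega),
        PySem.Int.floordiv_eq_ediv_of_pos (by omega), PySem.Int.mod_eq_emod_of_pos (by omega)]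
    ring
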